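-- pv_equiv track=rewrite | github.com/capstone-bangkit-c22-ky01/traveloka-ocr-ml | optical-character-recognition/main2.py | process_sex
-- ===== SOURCE A (Python) =====
-- def process_sex(input):
--     male = ['K', 'L']
--     female = ['P', 'R']
--     sex = 0
--     for ch in input:
--         if ch in male:
--             sex += 1
--         elif ch in female:
--             sex -= 1
--
--     return "LAKI-LAKI" if sex >= 0 else "PEREMPUAN"
-- ===== SOURCE B (Python) =====
-- def process_sex(input):
--     relevant = [ch for ch in input if ch in "KLPR"]
--     male = len([ch for ch in relevant if ch in "KL"])
--     return "LAKI-LAKI" if 2 * male >= len(relevant) else "PEREMPUAN"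
-- ===== Notes on version B (the rewrite author's own statement) =====
-- stated objective: alternative
-- what changed: Replaced the signed per-character if/elif accumulator with a filter of the sex-relevant characters followed by a majority test (2*male >= total relevant), so no running score is kept at all.
import Mathlib
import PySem

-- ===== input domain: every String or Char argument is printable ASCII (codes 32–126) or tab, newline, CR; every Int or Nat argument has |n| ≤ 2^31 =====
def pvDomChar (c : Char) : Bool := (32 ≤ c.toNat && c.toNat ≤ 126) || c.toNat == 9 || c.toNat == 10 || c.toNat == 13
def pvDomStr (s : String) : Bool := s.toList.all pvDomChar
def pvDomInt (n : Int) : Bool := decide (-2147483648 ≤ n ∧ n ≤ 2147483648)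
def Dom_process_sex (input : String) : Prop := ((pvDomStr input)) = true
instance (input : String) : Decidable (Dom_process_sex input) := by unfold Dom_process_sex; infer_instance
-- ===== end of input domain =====

-- B filters the sex-relevant characters and decides by a majority test (2*male >= total relevant)
-- instead of A's signed per-character if/elif accumulator; alternative decomposition, same O(n).
-- ===== PORT A =====
def process_sex (input : String) : String :=
  let male : List Char := ['K', 'L']
  let female : List Char := ['P', 'R']
  let sex : Int := input.toList.foldl (fun sex ch =>
    if male.contains ch then sex + 1
    else if female.contains ch then sex - 1
    else sex) 0
  if sex ≥ 0 then "LAKI-LAKI" else "PEREMPUAN"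

-- ===== PORT B =====
-- 'ch in "KLPR"' on a single character is membership in the string's characters (exact here).
def process_sex_alt (input : String) : String :=
  let relevant : List Char := input.toList.filter (fun ch => ("KLPR".toList).contains ch)
  let male : Nat := (relevant.filter (fun ch => ("KL".toList).contains ch)).length
  if 2 * male ≥ relevant.length then "LAKI-LAKI" else "PEREMPUAN"

-- ===== PRECONDITION & SPEC =====
def Spec_process_sex (input : String) (out : String) : Prop := out = process_sex_alt input
instance (input : String) (out : String) : Decidable (Spec_process_sex input out) := by unfold Spec_process_sex; infer_instance

-- ===== CLAIM (what is proved, stated in full; the proofs are below) =====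
def Claim_equal_process_sex : Prop := ∀ (input : String), Dom_process_sex input → Spec_process_sex input (process_sex input)

-- ===== LEMMAS AND PROOFS =====
lemma pv_fold_eq (cs : List Char) (acc : Int) :
    cs.foldl (fun sex ch =>
      if (['K', 'L'] : List Char).contains ch then sex + 1
      else if (['P', 'R'] : List Char).contains ch then sex - 1
      else sex) acc
    = acc + ((cs.count 'K' : Int) + cs.count 'L') - ((cs.count 'P' : Int) + cs.count 'R') := by
  induction cs generalizing acc with
  | nil => simp
  | cons c cs ih =>
    simp only [List.foldl_cons, List.count_cons, List.contains_cons,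
      List.contains_nil, Bool.or_false, beq_iff_eq]
    by_cases h1 : c = 'K' <;> by_cases h2 : c = 'L' <;> by_cases h3 : c = 'P' <;>
      by_cases h4 : c = 'R' <;> simp_all <;> ring

lemma pv_counts (cs : List Char) :
    ((cs.filter (fun ch => ("KLPR".toList).contains ch)).filter
        (fun ch => ("KL".toList).contains ch)).length
      = cs.count 'K' + cs.count 'L'
    ∧ (cs.filter (fun ch => ("KLPR".toList).contains ch)).length
      = cs.count 'K' + cs.count 'L' + cs.count 'P' + cs.count 'R' := by
  induction cs with
  | nil => simp
  | cons c cs ih =>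
    obtain ⟨ih1, ih2⟩ := ih
    by_cases h1 : c = 'K' <;> by_cases h2 : c = 'L' <;> by_cases h3 : c = 'P' <;>
      by_cases h4 : c = 'R' <;>
      simp_all [List.count_cons, List.filter_cons] <;> omega

-- ===== VERDICT (by name: the statement is the Claim_ definition above) =====
theorem process_sex_spec : Claim_equal_process_sex := by
  intro input _
  unfold Spec_process_sex process_sex process_sex_alt
  obtain ⟨h1, h2⟩ := pv_counts input.toList
  simp only [pv_fold_eq, zero_add, h1, h2]
  split_ifs with ha hb hb <;> first | rfl | (exfalso; omega)
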